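-- pv_equiv track=rewrite | github.com/Miner320/proj-tr1 | camadaFisica.py | __bipolarEncoder
-- ===== SOURCE A (Python) =====
-- def __bipolarEncoder(binaryString, voltageLevel):
--
--     bipolarList = []
--     currentVoltage = voltageLevel
--
--     for bit in binaryString:
--         if(bit=='0'):
--             bipolarList.append(0)
--         else:
--             bipolarList.append(currentVoltage)
--             currentVoltage = -currentVoltage
--
--     return bipolarList
-- ===== SOURCE B (Python) =====
-- def __bipolarEncoder(binaryString, voltageLevel):
--     # Pass 1: for each position, how many non-'0' bits strictly precede it.
--     prefix_nonzero = []
--     ones = 0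
--     for bit in binaryString:
--         prefix_nonzero.append(ones)
--         if bit != '0':
--             ones += 1
--     # Pass 2: parity of that count decides the sign of the pulse.
--     return [0 if bit == '0' else (voltageLevel if k % 2 == 0 else -voltageLevel)
--             for bit, k in zip(binaryString, prefix_nonzero)]
-- ===== Notes on version B (the rewrite author's own statement) =====
-- stated objective: alternative
-- what changed: Replaces A's single pass threading a sign-flipping voltage variable by a two-pass decomposition: first compute the prefix count of non-'0' bits at each position, then map each bit to 0 or to +/-voltageLevel by the parity of that count.
import Mathlib
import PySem

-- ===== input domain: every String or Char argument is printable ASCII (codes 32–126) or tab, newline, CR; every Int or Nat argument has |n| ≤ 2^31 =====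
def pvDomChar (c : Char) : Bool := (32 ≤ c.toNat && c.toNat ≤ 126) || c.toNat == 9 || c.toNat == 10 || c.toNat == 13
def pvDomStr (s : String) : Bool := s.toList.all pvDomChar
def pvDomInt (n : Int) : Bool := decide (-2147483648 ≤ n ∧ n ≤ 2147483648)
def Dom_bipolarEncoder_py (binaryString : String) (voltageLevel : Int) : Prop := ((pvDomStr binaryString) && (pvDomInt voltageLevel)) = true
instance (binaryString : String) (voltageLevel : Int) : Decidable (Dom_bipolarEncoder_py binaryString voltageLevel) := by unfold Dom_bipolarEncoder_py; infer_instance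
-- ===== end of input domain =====

-- B replaces A's single pass with a flipping voltage variable by a two-pass
-- prefix-count-of-pulses + parity map decomposition (alternative, same O(n) cost).


-- ===== PORT A =====
-- A's loop: state (bipolarList, currentVoltage), append 0 or the current voltage, flipping it.
def bipolarEncoder_py (binaryString : String) (voltageLevel : Int) : List Int :=
  (binaryString.toList.foldl
    (fun (st : List Int × Int) bit =>
      if bit = '0' then (st.1 ++ [0], st.2)
      else (st.1 ++ [st.2], -st.2))
    ([], voltageLevel)).1

-- ===== PORT B =====
-- Pass 1 of Source B: prefix counts of non-'0' bits (the appended `ones` values).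
def prefixNonzeroB : List Char → Int → List Int
  | [], _ => []
  | bit :: t, ones => ones :: prefixNonzeroB t (if bit ≠ '0' then ones + 1 else ones)

-- Pass 2 of Source B: the zip comprehension.
def bipolarEncoder_py_alt (binaryString : String) (voltageLevel : Int) : List Int :=
  (binaryString.toList.zip (prefixNonzeroB binaryString.toList 0)).map
    (fun p => if p.1 = '0' then 0 else if p.2 % 2 = 0 then voltageLevel else -voltageLevel)

-- ===== PRECONDITION & SPEC =====
def Spec_bipolarEncoder_py (binaryString : String) (voltageLevel : Int) (out : List Int) : Prop := out = bipolarEncoder_py_alt binaryString voltageLevel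
instance (binaryString : String) (voltageLevel : Int) (out : List Int) : Decidable (Spec_bipolarEncoder_py binaryString voltageLevel out) := by unfold Spec_bipolarEncoder_py; infer_instance

-- ===== CLAIM (what is proved, stated in full; the proofs are below) =====
def Claim_equal_bipolarEncoder_py : Prop := ∀ (binaryString : String) (voltageLevel : Int), Dom_bipolarEncoder_py binaryString voltageLevel → Spec_bipolarEncoder_py binaryString voltageLevel (bipolarEncoder_py binaryString voltageLevel)

-- ===== LEMMAS AND PROOFS =====

-- A's loop, written as structural recursion on the character list.
def goA : List Char → Int → List Int
  | [], _ => []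
  | c :: t, cur => if c = '0' then 0 :: goA t cur else cur :: goA t (-cur)

theorem foldlA_fst (cs : List Char) (acc : List Int) (cur : Int) :
    (cs.foldl
      (fun (st : List Int × Int) bit =>
        if bit = '0' then (st.1 ++ [0], st.2)
        else (st.1 ++ [st.2], -st.2))
      (acc, cur)).1 = acc ++ goA cs cur := by
  induction cs generalizing acc cur with
  | nil => simp [goA]
  | cons c t ih =>
    by_cases h : c = '0' <;> simp [goA, h, List.foldl_cons, ih]

-- Core invariant: A's current voltage is voltageLevel signed by the parity of
-- the number of pulses emitted so far (B's running `ones` counter).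
theorem goA_eq_map (v : Int) (cs : List Char) (ones : Int) :
    goA cs (if ones % 2 = 0 then v else -v)
      = (cs.zip (prefixNonzeroB cs ones)).map
          (fun p => if p.1 = '0' then 0 else if p.2 % 2 = 0 then v else -v) := by
  induction cs generalizing ones with
  | nil => simp [goA, prefixNonzeroB]
  | cons c t ih =>
    by_cases h : c = '0'
    · have hne : ¬ (c ≠ '0') := fun hn => hn h
      simp only [goA, prefixNonzeroB, List.zip_cons_cons, List.map_cons]
      rw [if_pos h, if_pos h, if_neg hne, ih ones]
    · have hpar : -(if ones % 2 = 0 then v else -v)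
          = (if (ones + 1) % 2 = 0 then v else -v) := by
        rcases Int.emod_two_eq_zero_or_one ones with hp | hp <;>
          · have : (ones + 1) % 2 = (ones % 2 + 1) % 2 := by omega
            simp [hp, this]
      simp only [goA, prefixNonzeroB, List.zip_cons_cons, List.map_cons]
      rw [if_neg h, if_neg h, if_pos h, hpar, ih (ones + 1)]

-- ===== VERDICT (by name: the statement is the Claim_ definition above) =====
theorem bipolarEncoder_py_spec : Claim_equal_bipolarEncoder_py := by
  intro s v _
  unfold Spec_bipolarEncoder_py bipolarEncoder_py bipolarEncoder_py_alt
  rw [foldlA_fst, List.nil_append]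
  have := goA_eq_map v s.toList 0
  simpa using this
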